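-- pv_equiv track=rewrite | github.com/tcummings-tomandco/ai-content-creation | scripts/pick_next_topic.py | queue_order
-- ===== SOURCE A (Python) =====
-- def is_open(row):
--     status = (row.get("Status") or "").strip().lower()
--     return status in ("", "backlog", "none")
--
-- def queue_order(roadmap):
--     p0 = [r for r in roadmap if r.get("Priority") == "P0" and is_open(r)]
--     p1_qw = [r for r in roadmap if r.get("Priority") == "P1" and r.get("Quick win") == "Y" and is_open(r)]
--     p1 = [r for r in roadmap if r.get("Priority") == "P1" and r.get("Quick win") != "Y" and is_open(r)]
--     p2 = [r for r in roadmap if r.get("Priority") == "P2" and is_open(r)]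
--     p3 = [r for r in roadmap if r.get("Priority") == "P3" and is_open(r)]
--     for bucket in (p0, p1_qw, p1, p2, p3):
--         bucket.sort(key=lambda r: int(r.get("ID") or 99999))
--     return p0 + p1_qw + p1 + p2 + p3
-- ===== SOURCE B (Python) =====
-- def queue_order(roadmap):
--     def _rank(r):
--         status = (r.get("Status") or "").strip().lower()
--         if status not in ("", "backlog", "none"):
--             return None
--         p = r.get("Priority")
--         if p == "P0":
--             return 0
--         if p == "P1":
--             return 1 if r.get("Quick win") == "Y" else 2
--         if p == "P2":
--             return 3
--         if p == "P3":
--             return 4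
--         return None
--
--     queue = [r for r in roadmap if _rank(r) is not None]
--     queue.sort(key=lambda r: (_rank(r), int(r.get("ID") or 99999)))
--     return queue
-- ===== Notes on version B (the rewrite author's own statement) =====
-- stated objective: simpler
-- what changed: Replaces A's five separate filter passes plus five per-bucket sorts with one rank function, one filtering pass and a single stable sort keyed by (rank, numeric ID).
import Mathlib
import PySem

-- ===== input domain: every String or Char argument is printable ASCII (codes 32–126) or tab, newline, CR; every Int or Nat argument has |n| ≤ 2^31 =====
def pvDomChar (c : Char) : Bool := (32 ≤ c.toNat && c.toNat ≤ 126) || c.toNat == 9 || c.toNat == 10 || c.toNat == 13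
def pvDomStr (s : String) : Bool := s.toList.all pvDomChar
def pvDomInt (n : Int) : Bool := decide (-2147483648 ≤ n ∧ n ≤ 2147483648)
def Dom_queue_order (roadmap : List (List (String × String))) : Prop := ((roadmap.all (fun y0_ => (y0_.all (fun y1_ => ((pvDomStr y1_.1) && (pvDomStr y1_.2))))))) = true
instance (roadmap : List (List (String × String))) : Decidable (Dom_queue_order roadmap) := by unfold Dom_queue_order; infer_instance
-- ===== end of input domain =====

-- B replaces A's five filter passes + five per-bucket sorts by one rank function, one
-- filtering pass and a single stable sort keyed by (rank, numeric ID): simpler, same results.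

-- ===== PORT A =====
-- is_open(row) — shared module helper: both Pythons contain exactly this test
def pvIsOpen (r : List (String × String)) : Bool :=
  let status := PySem.Str.lower (PySem.Str.strip (PySem.Dict.getD ⟨r⟩ "Status" ""))
  status == "" || status == "backlog" || status == "none"

-- int(r.get("ID") or 99999); the `.getD 0` arm is only reached where Python raises
-- ValueError (Pre_ excludes exactly those inputs) — both Pythons contain this expression
def pvIdKey (r : List (String × String)) : Int :=
  let s := PySem.Dict.getD ⟨r⟩ "ID" ""
  if s == "" then 99999 else (PySem.Int.ofStr? s).getD 0

def queue_order (roadmap : List (List (String × String))) : List (List (String × String)) :=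
  let p0 := roadmap.filter (fun r => PySem.Dict.get? ⟨r⟩ "Priority" == some "P0" && pvIsOpen r)
  let p1qw := roadmap.filter (fun r => PySem.Dict.get? ⟨r⟩ "Priority" == some "P1" && PySem.Dict.get? ⟨r⟩ "Quick win" == some "Y" && pvIsOpen r)
  let p1 := roadmap.filter (fun r => PySem.Dict.get? ⟨r⟩ "Priority" == some "P1" && !(PySem.Dict.get? ⟨r⟩ "Quick win" == some "Y") && pvIsOpen r)
  let p2 := roadmap.filter (fun r => PySem.Dict.get? ⟨r⟩ "Priority" == some "P2" && pvIsOpen r)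
  let p3 := roadmap.filter (fun r => PySem.Dict.get? ⟨r⟩ "Priority" == some "P3" && pvIsOpen r)
  PySem.List.sorted p0 pvIdKey ++ PySem.List.sorted p1qw pvIdKey ++
    PySem.List.sorted p1 pvIdKey ++ PySem.List.sorted p2 pvIdKey ++ PySem.List.sorted p3 pvIdKey

-- ===== PORT B =====
-- _rank(r): None = excluded, otherwise 0..4
def pvRank? (r : List (String × String)) : Option Int :=
  if !pvIsOpen r then none
  else
    let p := PySem.Dict.get? ⟨r⟩ "Priority"
    if p == some "P0" then some 0
    else if p == some "P1" then (if PySem.Dict.get? ⟨r⟩ "Quick win" == some "Y" then some 1 else some 2)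
    else if p == some "P2" then some 3
    else if p == some "P3" then some 4
    else none

def queue_order_alt (roadmap : List (List (String × String))) : List (List (String × String)) :=
  let queue := roadmap.filter (fun r => (pvRank? r).isSome)
  PySem.List.sorted2 queue (fun r => (pvRank? r).getD 0) pvIdKey

-- ===== PRECONDITION & SPEC =====
-- Pre_ excludes exactly the inputs on which the Python A raises ValueError: a row that lands
-- in one of A's buckets but whose "ID" value is a non-empty string int() cannot parse.
def Pre_queue_order (roadmap : List (List (String × String))) : Prop :=
  ∀ r ∈ roadmap,
    (pvIsOpen r = true ∧
      (PySem.Dict.get? ⟨r⟩ "Priority" = some "P0" ∨ PySem.Dict.get? ⟨r⟩ "Priority" = some "P1" ∨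
       PySem.Dict.get? ⟨r⟩ "Priority" = some "P2" ∨ PySem.Dict.get? ⟨r⟩ "Priority" = some "P3")) →
    (PySem.Dict.getD ⟨r⟩ "ID" "" = "" ∨ (PySem.Int.ofStr? (PySem.Dict.getD ⟨r⟩ "ID" "")).isSome = true)
instance (roadmap : List (List (String × String))) : Decidable (Pre_queue_order roadmap) := by
  unfold Pre_queue_order; infer_instance

def pvWitness_queue_order : (List (List (String × String))) :=
  [[("Priority", "P1"), ("ID", "7")], [("Priority", "P0"), ("Status", "Backlog"), ("ID", " 2 ")],
   [("Priority", "P1"), ("Quick win", "Y")], [("Priority", "P9"), ("ID", "oops")]]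

def Spec_queue_order (roadmap : List (List (String × String))) (out : List (List (String × String))) : Prop := out = queue_order_alt roadmap
instance (roadmap : List (List (String × String))) (out : List (List (String × String))) : Decidable (Spec_queue_order roadmap out) := by unfold Spec_queue_order; infer_instance

-- ===== CLAIM (what is proved, stated in full; the proofs are below) =====
def Claim_equal_queue_order : Prop := ∀ (roadmap : List (List (String × String))), Dom_queue_order roadmap → Pre_queue_order roadmap → Spec_queue_order roadmap (queue_order roadmap)

-- ===== LEMMAS AND PROOFS =====

-- generic facts about PySem.List.insertBy
theorem insertBy_append_of_before {α : Type} (before : α → α → Bool) (x : α) (ys zs : List α)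
    (h : ∀ z ∈ zs, before x z = true) :
    PySem.List.insertBy before x (ys ++ zs) = PySem.List.insertBy before x ys ++ zs := by
  induction ys with
  | nil =>
    cases zs with
    | nil => rfl
    | cons z zs' => simp [PySem.List.insertBy, h z (by simp)]
  | cons y ys' ih =>
    by_cases hy : before x y = true <;> simp [PySem.List.insertBy, hy, ih]

theorem insertBy_append_of_not_before {α : Type} (before : α → α → Bool) (x : α) (ys zs : List α)
    (h : ∀ y ∈ ys, before x y = false) :
    PySem.List.insertBy before x (ys ++ zs) = ys ++ PySem.List.insertBy before x zs := by
  induction ys with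
  | nil => rfl
  | cons y ys' ih =>
    have hy := h y (by simp)
    simp only [List.cons_append, PySem.List.insertBy, hy, Bool.false_eq_true, if_false]
    exact congrArg (y :: ·) (ih (fun y hm => h y (by simp [hm])))

theorem insertBy_congr {α : Type} (before before' : α → α → Bool) (x : α) (ys : List α)
    (h : ∀ y ∈ ys, before x y = before' x y) :
    PySem.List.insertBy before x ys = PySem.List.insertBy before' x ys := by
  induction ys with
  | nil => rfl
  | cons y ys' ih =>
    have hy := h y (by simp)
    by_cases hb : before x y = true <;>
      simp only [PySem.List.insertBy, hb, hy ▸ hb, Bool.false_eq_true, if_true, if_false] <;>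
      first
        | rfl
        | exact congrArg (y :: ·) (ih (fun y hm => h y (by simp [hm])))

-- sorted over a snoc
theorem sorted_snoc {α : Type} (L : List α) (x : α) (k : α → Int) :
    PySem.List.sorted (L ++ [x]) k =
      PySem.List.insertBy (fun a b => decide (k a < k b)) x (PySem.List.sorted L k) := by
  rw [PySem.List.sorted_eq_foldl_insertBy, PySem.List.sorted_eq_foldl_insertBy, List.foldl_append]
  rfl

def lex2 {α : Type} (k1 k2 : α → Int) (a b : α) : Bool :=
  decide (k1 a < k1 b) || (!decide (k1 b < k1 a) && decide (k2 a < k2 b))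

theorem sorted2_snoc {α : Type} (L : List α) (x : α) (k1 k2 : α → Int) :
    PySem.List.sorted2 (L ++ [x]) k1 k2 =
      PySem.List.insertBy (lex2 k1 k2) x (PySem.List.sorted2 L k1 k2) := by
  simp only [PySem.List.sorted2, List.foldl_append, List.foldl_cons, List.foldl_nil]
  rfl

-- the stable sort (by k2) of the rank-i elements of L
def blockOf {α : Type} (k1 k2 : α → Int) (L : List α) (i : Int) : List α :=
  PySem.List.sorted (L.filter (fun x => k1 x == i)) k2

theorem mem_blockOf {α : Type} (k1 k2 : α → Int) (L : List α) (i : Int) (y : α)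
    (h : y ∈ blockOf k1 k2 L i) : k1 y = i := by
  unfold blockOf at h
  rw [PySem.List.mem_sorted] at h
  simpa using (List.of_mem_filter h)

-- a single lex-keyed stable sort equals the concatenation of per-rank stable sorts
theorem sorted2_blocks {α : Type} (k1 k2 : α → Int) (L : List α)
    (h : ∀ x ∈ L, k1 x = 0 ∨ k1 x = 1 ∨ k1 x = 2 ∨ k1 x = 3 ∨ k1 x = 4) :
    PySem.List.sorted2 L k1 k2 =
      blockOf k1 k2 L 0 ++ blockOf k1 k2 L 1 ++ blockOf k1 k2 L 2 ++
        blockOf k1 k2 L 3 ++ blockOf k1 k2 L 4 := by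
  induction L using List.reverseRecOn with
  | nil => rfl
  | append_singleton L x ih =>
    have hL : ∀ y ∈ L, k1 y = 0 ∨ k1 y = 1 ∨ k1 y = 2 ∨ k1 y = 3 ∨ k1 y = 4 :=
      fun y hy => h y (by simp [hy])
    rw [sorted2_snoc, ih hL]
    have hblock : ∀ (i : Int), k1 x = i →
        blockOf k1 k2 (L ++ [x]) i
          = PySem.List.insertBy (fun a b => decide (k2 a < k2 b)) x (blockOf k1 k2 L i) := by
      intro i hi
      unfold blockOf
      rw [List.filter_append, List.filter_cons, List.filter_nil]
      simp only [hi, BEq.rfl, if_pos]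
      exact sorted_snoc _ _ _
    have hblock_ne : ∀ (i : Int), k1 x ≠ i → blockOf k1 k2 (L ++ [x]) i = blockOf k1 k2 L i := by
      intro i hi
      unfold blockOf
      rw [List.filter_append, List.filter_cons]
      simp [hi]
    have hlt : ∀ (y : α) (j : Int), k1 y = j → j < k1 x → lex2 k1 k2 x y = false := by
      intro y j hj hji; simp [lex2, hj]; omega
    have hgt : ∀ (y : α) (j : Int), k1 y = j → k1 x < j → lex2 k1 k2 x y = true := by
      intro y j hj hji; simp [lex2, hj]; omega
    have heq : ∀ (y : α), k1 y = k1 x → lex2 k1 k2 x y = decide (k2 x < k2 y) := by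
      intro y hj; simp [lex2, hj]
    rw [show blockOf k1 k2 L 0 ++ blockOf k1 k2 L 1 ++ blockOf k1 k2 L 2 ++ blockOf k1 k2 L 3 ++ blockOf k1 k2 L 4
          = blockOf k1 k2 L 0 ++ (blockOf k1 k2 L 1 ++ (blockOf k1 k2 L 2 ++ (blockOf k1 k2 L 3 ++ blockOf k1 k2 L 4))) from by simp]
    rcases h x (by simp) with hx | hx | hx | hx | hx
    · rw [insertBy_append_of_before (lex2 k1 k2) x _ _ (fun z hz => by
            rcases List.mem_append.mp hz with hm | hm
            · exact hgt z 1 (mem_blockOf k1 k2 L 1 z hm) (by omega)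
            rcases List.mem_append.mp hm with hm | hm
            · exact hgt z 2 (mem_blockOf k1 k2 L 2 z hm) (by omega)
            rcases List.mem_append.mp hm with hm | hm
            · exact hgt z 3 (mem_blockOf k1 k2 L 3 z hm) (by omega)
            · exact hgt z 4 (mem_blockOf k1 k2 L 4 z hm) (by omega)),
          insertBy_congr (lex2 k1 k2) (fun a b => decide (k2 a < k2 b)) x _ (fun y hy => heq y (by rw [mem_blockOf k1 k2 L 0 y hy, hx])),
          hblock 0 hx, hblock_ne 1 (by omega), hblock_ne 2 (by omega), hblock_ne 3 (by omega), hblock_ne 4 (by omega)]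
      simp [List.append_assoc]
    · rw [insertBy_append_of_not_before (lex2 k1 k2) x _ _
            (fun y hy => hlt y 0 (mem_blockOf k1 k2 L 0 y hy) (by omega)),
          insertBy_append_of_before (lex2 k1 k2) x _ _ (fun z hz => by
            rcases List.mem_append.mp hz with hm | hm
            · exact hgt z 2 (mem_blockOf k1 k2 L 2 z hm) (by omega)
            rcases List.mem_append.mp hm with hm | hm
            · exact hgt z 3 (mem_blockOf k1 k2 L 3 z hm) (by omega)
            · exact hgt z 4 (mem_blockOf k1 k2 L 4 z hm) (by omega)),
          insertBy_congr (lex2 k1 k2) (fun a b => decide (k2 a < k2 b)) x _ (fun y hy => heq y (by rw [mem_blockOf k1 k2 L 1 y hy, hx])),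
          hblock 1 hx, hblock_ne 0 (by omega), hblock_ne 2 (by omega), hblock_ne 3 (by omega), hblock_ne 4 (by omega)]
      simp [List.append_assoc]
    · rw [insertBy_append_of_not_before (lex2 k1 k2) x _ _
            (fun y hy => hlt y 0 (mem_blockOf k1 k2 L 0 y hy) (by omega)),
          insertBy_append_of_not_before (lex2 k1 k2) x _ _
            (fun y hy => hlt y 1 (mem_blockOf k1 k2 L 1 y hy) (by omega)),
          insertBy_append_of_before (lex2 k1 k2) x _ _ (fun z hz => by
            rcases List.mem_append.mp hz with hm | hm
            · exact hgt z 3 (mem_blockOf k1 k2 L 3 z hm) (by omega)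
            · exact hgt z 4 (mem_blockOf k1 k2 L 4 z hm) (by omega)),
          insertBy_congr (lex2 k1 k2) (fun a b => decide (k2 a < k2 b)) x _ (fun y hy => heq y (by rw [mem_blockOf k1 k2 L 2 y hy, hx])),
          hblock 2 hx, hblock_ne 0 (by omega), hblock_ne 1 (by omega), hblock_ne 3 (by omega), hblock_ne 4 (by omega)]
      simp [List.append_assoc]
    · rw [insertBy_append_of_not_before (lex2 k1 k2) x _ _
            (fun y hy => hlt y 0 (mem_blockOf k1 k2 L 0 y hy) (by omega)),
          insertBy_append_of_not_before (lex2 k1 k2) x _ _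
            (fun y hy => hlt y 1 (mem_blockOf k1 k2 L 1 y hy) (by omega)),
          insertBy_append_of_not_before (lex2 k1 k2) x _ _
            (fun y hy => hlt y 2 (mem_blockOf k1 k2 L 2 y hy) (by omega)),
          insertBy_append_of_before (lex2 k1 k2) x _ _
            (fun z hz => hgt z 4 (mem_blockOf k1 k2 L 4 z hz) (by omega)),
          insertBy_congr (lex2 k1 k2) (fun a b => decide (k2 a < k2 b)) x _ (fun y hy => heq y (by rw [mem_blockOf k1 k2 L 3 y hy, hx])),
          hblock 3 hx, hblock_ne 0 (by omega), hblock_ne 1 (by omega), hblock_ne 2 (by omega), hblock_ne 4 (by omega)]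
      simp [List.append_assoc]
    · rw [insertBy_append_of_not_before (lex2 k1 k2) x _ _
            (fun y hy => hlt y 0 (mem_blockOf k1 k2 L 0 y hy) (by omega)),
          insertBy_append_of_not_before (lex2 k1 k2) x _ _
            (fun y hy => hlt y 1 (mem_blockOf k1 k2 L 1 y hy) (by omega)),
          insertBy_append_of_not_before (lex2 k1 k2) x _ _
            (fun y hy => hlt y 2 (mem_blockOf k1 k2 L 2 y hy) (by omega)),
          insertBy_append_of_not_before (lex2 k1 k2) x _ _
            (fun y hy => hlt y 3 (mem_blockOf k1 k2 L 3 y hy) (by omega)),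
          insertBy_congr (lex2 k1 k2) (fun a b => decide (k2 a < k2 b)) x _ (fun y hy => heq y (by rw [mem_blockOf k1 k2 L 4 y hy, hx])),
          hblock 4 hx, hblock_ne 0 (by omega), hblock_ne 1 (by omega), hblock_ne 2 (by omega), hblock_ne 3 (by omega)]
      simp [List.append_assoc]

-- rank characterisations, proved over an abstracted core to keep defeq cheap
def rankCore (o : Bool) (p q : Option String) : Option Int :=
  if !o then none
  else if p == some "P0" then some 0
  else if p == some "P1" then (if q == some "Y" then some 1 else some 2)
  else if p == some "P2" then some 3
  else if p == some "P3" then some 4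
  else none

theorem pvRank?_eq (r : List (String × String)) :
    pvRank? r = rankCore (pvIsOpen r) (PySem.Dict.get? ⟨r⟩ "Priority") (PySem.Dict.get? ⟨r⟩ "Quick win") := rfl

theorem core_case0 (o : Bool) (p q : Option String) :
    ((rankCore o p q).isSome && ((rankCore o p q).getD 0 == (0 : Int))) = (p == some "P0" && o) := by
  simp only [rankCore]; split_ifs <;> simp_all

theorem core_case1 (o : Bool) (p q : Option String) :
    ((rankCore o p q).isSome && ((rankCore o p q).getD 0 == (1 : Int))) = (p == some "P1" && q == some "Y" && o) := by
  simp only [rankCore]; split_ifs <;> simp_all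

theorem core_case2 (o : Bool) (p q : Option String) :
    ((rankCore o p q).isSome && ((rankCore o p q).getD 0 == (2 : Int))) = (p == some "P1" && !(q == some "Y") && o) := by
  simp only [rankCore]; split_ifs <;> simp_all

theorem core_case3 (o : Bool) (p q : Option String) :
    ((rankCore o p q).isSome && ((rankCore o p q).getD 0 == (3 : Int))) = (p == some "P2" && o) := by
  simp only [rankCore]; split_ifs <;> simp_all

theorem core_case4 (o : Bool) (p q : Option String) :
    ((rankCore o p q).isSome && ((rankCore o p q).getD 0 == (4 : Int))) = (p == some "P3" && o) := by
  simp only [rankCore]; split_ifs <;> simp_all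

theorem core_mem (o : Bool) (p q : Option String) (v : Int) (h : rankCore o p q = some v) :
    v = 0 ∨ v = 1 ∨ v = 2 ∨ v = 3 ∨ v = 4 := by
  simp only [rankCore] at h
  split_ifs at h <;> simp_all

theorem rank_filter (i : Int) (cond : List (String × String) → Bool)
    (hc : ∀ r, ((pvRank? r).isSome && ((pvRank? r).getD 0 == i)) = cond r)
    (roadmap : List (List (String × String))) :
    (roadmap.filter (fun r => (pvRank? r).isSome)).filter (fun r => (pvRank? r).getD 0 == i)
      = roadmap.filter cond := by
  rw [List.filter_filter]
  exact List.filter_congr (fun r _ => by rw [Bool.and_comm]; exact hc r)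

theorem rank_case0 (r : List (String × String)) :
    ((pvRank? r).isSome && ((pvRank? r).getD 0 == (0 : Int)))
      = (PySem.Dict.get? ⟨r⟩ "Priority" == some "P0" && pvIsOpen r) := by
  rw [pvRank?_eq]; exact core_case0 _ _ _

theorem rank_case1 (r : List (String × String)) :
    ((pvRank? r).isSome && ((pvRank? r).getD 0 == (1 : Int)))
      = (PySem.Dict.get? ⟨r⟩ "Priority" == some "P1" && PySem.Dict.get? ⟨r⟩ "Quick win" == some "Y" && pvIsOpen r) := by
  rw [pvRank?_eq]; exact core_case1 _ _ _

theorem rank_case2 (r : List (String × String)) :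
    ((pvRank? r).isSome && ((pvRank? r).getD 0 == (2 : Int)))
      = (PySem.Dict.get? ⟨r⟩ "Priority" == some "P1" && !(PySem.Dict.get? ⟨r⟩ "Quick win" == some "Y") && pvIsOpen r) := by
  rw [pvRank?_eq]; exact core_case2 _ _ _

theorem rank_case3 (r : List (String × String)) :
    ((pvRank? r).isSome && ((pvRank? r).getD 0 == (3 : Int)))
      = (PySem.Dict.get? ⟨r⟩ "Priority" == some "P2" && pvIsOpen r) := by
  rw [pvRank?_eq]; exact core_case3 _ _ _

theorem rank_case4 (r : List (String × String)) :
    ((pvRank? r).isSome && ((pvRank? r).getD 0 == (4 : Int)))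
      = (PySem.Dict.get? ⟨r⟩ "Priority" == some "P3" && pvIsOpen r) := by
  rw [pvRank?_eq]; exact core_case4 _ _ _

theorem queue_order_eq (roadmap : List (List (String × String))) :
    queue_order roadmap = queue_order_alt roadmap := by
  simp only [queue_order, queue_order_alt]
  rw [sorted2_blocks (fun r => (pvRank? r).getD 0) pvIdKey _
        (fun x hx => by
          have hs : (pvRank? x).isSome = true := by simpa using (List.mem_filter.mp hx).2
          rcases Option.isSome_iff_exists.mp hs with ⟨v, hv⟩
          simp only [hv, Option.getD_some]
          exact core_mem _ _ _ v ((pvRank?_eq x).symm.trans hv))]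
  unfold blockOf
  rw [rank_filter 0 _ rank_case0, rank_filter 1 _ rank_case1, rank_filter 2 _ rank_case2,
      rank_filter 3 _ rank_case3, rank_filter 4 _ rank_case4]

-- ===== VERDICT (by name: the statement is the Claim_ definition above) =====
theorem queue_order_spec : Claim_equal_queue_order := by
  intro roadmap _ _
  unfold Spec_queue_order
  exact queue_order_eq roadmap
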